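-- pv_equiv track=rewrite | github.com/MahjongRepository/tenhou-python-bot | project/mahjong/tile.py | to_one_line_string
-- ===== SOURCE A (Python) =====
-- def to_one_line_string(tiles):
--     """
--     Convert 136 tiles array to the one line string
--     Example of output 123s123p123m33z
--     """
--     sou = [t for t in tiles if t < 36]
--
--     pin = [t for t in tiles if 36 <= t < 72]
--     pin = [t - 36 for t in pin]
--
--     man = [t for t in tiles if 72 <= t < 108]
--     man = [t - 72 for t in man]
--
--     honors = [t for t in tiles if t >= 108]
--     honors = [t - 108 for t in honors]
--
--     man = man and ''.join([str((i // 4) + 1) for i in man]) + 'm' or ''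
--     pin = pin and ''.join([str((i // 4) + 1) for i in pin]) + 'p' or ''
--     sou = sou and ''.join([str((i // 4) + 1) for i in sou]) + 's' or ''
--     honors = honors and ''.join([str((i // 4) + 1) for i in honors]) + 'z' or ''
--
--     return sou + pin + man + honors
-- ===== SOURCE B (Python) =====
-- def to_one_line_string(tiles):
--     sou = pin = man = honors = ''
--     for t in tiles:
--         if t < 36:
--             sou += str(t // 4 + 1)
--         elif t < 72:
--             pin += str((t - 36) // 4 + 1)
--         elif t < 108:
--             man += str((t - 72) // 4 + 1)
--         else:
--             honors += str((t - 108) // 4 + 1)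
--     if sou:
--         sou += 's'
--     if pin:
--         pin += 'p'
--     if man:
--         man += 'm'
--     if honors:
--         honors += 'z'
--     return sou + pin + man + honors
-- ===== Notes on version B (the rewrite author's own statement) =====
-- stated objective: simpler
-- what changed: Replaces A's four filter/map/join list passes and and-or idiom with a single left-to-right loop maintaining four suit string accumulators, appending each tile's digit directly and suffixing nonempty buckets at the end.
import Mathlib
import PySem

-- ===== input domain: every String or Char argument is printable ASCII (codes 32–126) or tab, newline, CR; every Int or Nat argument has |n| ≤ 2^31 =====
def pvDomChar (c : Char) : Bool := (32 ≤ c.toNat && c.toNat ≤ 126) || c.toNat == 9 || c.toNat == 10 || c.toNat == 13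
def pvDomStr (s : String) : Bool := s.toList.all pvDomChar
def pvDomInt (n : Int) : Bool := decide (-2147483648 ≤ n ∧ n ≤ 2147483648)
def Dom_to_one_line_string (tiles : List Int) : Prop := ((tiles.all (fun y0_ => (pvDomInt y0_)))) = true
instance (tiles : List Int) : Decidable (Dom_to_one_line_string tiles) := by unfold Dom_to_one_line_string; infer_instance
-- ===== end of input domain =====

-- B replaces A's four filter/map/join passes by ONE left-to-right pass that appends each tile's
-- digit to its suit's string accumulator; objective: simpler (one loop, same O(n) cost).

-- ===== PORT A =====
-- ''.join([str((i // 4) + 1) for i in xs])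
def pvJoinDigits (xs : List Int) : List Char :=
  PySem.Chars.join [] (xs.map (fun i => PySem.Int.toChars (PySem.Int.floordiv i 4 + 1)))

def to_one_line_string (tiles : List Int) : String :=
  let sou := tiles.filter (fun t => decide (t < 36))
  let pin := (tiles.filter (fun t => decide (36 ≤ t ∧ t < 72))).map (fun t => t - 36)
  let man := (tiles.filter (fun t => decide (72 ≤ t ∧ t < 108))).map (fun t => t - 72)
  let honors := (tiles.filter (fun t => decide (108 ≤ t))).map (fun t => t - 108)
  -- 'lst and s or ""': s (= join ++ suffix) is a nonempty string whenever lst is nonempty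
  let manS := if man = [] then [] else pvJoinDigits man ++ ['m']
  let pinS := if pin = [] then [] else pvJoinDigits pin ++ ['p']
  let souS := if sou = [] then [] else pvJoinDigits sou ++ ['s']
  let honorsS := if honors = [] then [] else pvJoinDigits honors ++ ['z']
  String.ofList (souS ++ pinS ++ manS ++ honorsS)

-- ===== PORT B =====
-- one loop step: pick the bucket by the same cascade and append str(offset tile // 4 + 1)
def pvAltStep (acc : List Char × List Char × List Char × List Char) (t : Int) :
    List Char × List Char × List Char × List Char :=
  let (s, p, m, h) := acc
  if t < 36 then (s ++ PySem.Int.toChars (PySem.Int.floordiv t 4 + 1), p, m, h)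
  else if t < 72 then (s, p ++ PySem.Int.toChars (PySem.Int.floordiv (t - 36) 4 + 1), m, h)
  else if t < 108 then (s, p, m ++ PySem.Int.toChars (PySem.Int.floordiv (t - 72) 4 + 1), h)
  else (s, p, m, h ++ PySem.Int.toChars (PySem.Int.floordiv (t - 108) 4 + 1))

def to_one_line_string_alt (tiles : List Int) : String :=
  let acc := tiles.foldl pvAltStep ([], [], [], [])
  let s := if acc.1 = [] then acc.1 else acc.1 ++ ['s']
  let p := if acc.2.1 = [] then acc.2.1 else acc.2.1 ++ ['p']
  let m := if acc.2.2.1 = [] then acc.2.2.1 else acc.2.2.1 ++ ['m']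
  let h := if acc.2.2.2 = [] then acc.2.2.2 else acc.2.2.2 ++ ['z']
  String.ofList (s ++ p ++ m ++ h)

-- ===== PRECONDITION & SPEC =====
def Spec_to_one_line_string (tiles : List Int) (out : String) : Prop := out = to_one_line_string_alt tiles
instance (tiles : List Int) (out : String) : Decidable (Spec_to_one_line_string tiles out) := by unfold Spec_to_one_line_string; infer_instance

-- ===== CLAIM (what is proved, stated in full; the proofs are below) =====
def Claim_equal_to_one_line_string : Prop := ∀ (tiles : List Int), Dom_to_one_line_string tiles → Spec_to_one_line_string tiles (to_one_line_string tiles)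

-- ===== LEMMAS AND PROOFS =====

theorem pv_join_nil_eq_flatten (l : List (List Char)) : PySem.Chars.join [] l = l.flatten := by
  induction l with
  | nil => exact PySem.Chars.join_nil []
  | cons x xs ih =>
    cases xs with
    | nil => simp [PySem.Chars.join_singleton]
    | cons y ys => rw [PySem.Chars.join_cons_cons]; simp_all

theorem pvJoinDigits_cons (x : Int) (xs : List Int) :
    pvJoinDigits (x :: xs) = PySem.Int.toChars (PySem.Int.floordiv x 4 + 1) ++ pvJoinDigits xs := by
  simp [pvJoinDigits, pv_join_nil_eq_flatten]

theorem pv_toDigitsCore_length_le (b f n : Nat) (ds : List Char) :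
    ds.length ≤ (Nat.toDigitsCore b f n ds).length := by
  induction f generalizing n ds with
  | zero => simp [Nat.toDigitsCore]
  | succ f ih =>
    simp only [Nat.toDigitsCore]
    split
    · simp
    · exact le_trans (by simp) (ih _ _)

theorem pv_toChars_ne_nil (n : Int) : PySem.Int.toChars n ≠ [] := by
  unfold PySem.Int.toChars
  split
  · simp
  · unfold Nat.toDigits Nat.toDigitsCore
    by_cases hz : n.toNat / 10 = 0
    · simp [hz]
    · simp only [hz, if_false]
      intro h
      have := pv_toDigitsCore_length_le 10 n.toNat (n.toNat / 10) [Nat.digitChar (n.toNat % 10)]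
      rw [h] at this; simp at this

theorem pvJoinDigits_eq_nil_iff (xs : List Int) : pvJoinDigits xs = [] ↔ xs = [] := by
  cases xs with
  | nil => simp [pvJoinDigits, PySem.Chars.join_nil]
  | cons x t =>
    rw [pvJoinDigits_cons]
    exact ⟨fun hc => absurd (List.append_eq_nil_iff.mp hc).1 (pv_toChars_ne_nil _),
           fun hc => absurd hc (List.cons_ne_nil x t)⟩

theorem pv_foldl_altStep (tiles : List Int) (s p m h : List Char) :
    tiles.foldl pvAltStep (s, p, m, h) =
      (s ++ pvJoinDigits (tiles.filter (fun t => decide (t < 36))),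
       p ++ pvJoinDigits ((tiles.filter (fun t => decide (36 ≤ t ∧ t < 72))).map (fun t => t - 36)),
       m ++ pvJoinDigits ((tiles.filter (fun t => decide (72 ≤ t ∧ t < 108))).map (fun t => t - 72)),
       h ++ pvJoinDigits ((tiles.filter (fun t => decide (108 ≤ t))).map (fun t => t - 108))) := by
  induction tiles generalizing s p m h with
  | nil => simp [pvJoinDigits, PySem.Chars.join_nil]
  | cons x xs ih =>
    simp only [List.foldl_cons, List.filter_cons]
    by_cases h1 : x < 36
    · have c2 : ¬(36 ≤ x ∧ x < 72) := by omega
      have c3 : ¬(72 ≤ x ∧ x < 108) := by omega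
      have c4 : ¬(108 ≤ x) := by omega
      have hstep : pvAltStep (s, p, m, h) x =
        (s ++ PySem.Int.toChars (PySem.Int.floordiv x 4 + 1), p, m, h) := by
        simp [pvAltStep, h1]
      rw [hstep, ih]
      simp [h1, c2, c3, c4, pvJoinDigits_cons, List.append_assoc]
    · by_cases h2 : x < 72
      · have c2 : 36 ≤ x ∧ x < 72 := by omega
        have c3 : ¬(72 ≤ x ∧ x < 108) := by omega
        have c4 : ¬(108 ≤ x) := by omega
        have hstep : pvAltStep (s, p, m, h) x =
          (s, p ++ PySem.Int.toChars (PySem.Int.floordiv (x - 36) 4 + 1), m, h) := by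
          simp [pvAltStep, h1, h2]
        rw [hstep, ih]
        simp [h1, c2, c3, c4, pvJoinDigits_cons, List.append_assoc]
      · by_cases h3 : x < 108
        · have c2 : ¬(36 ≤ x ∧ x < 72) := by omega
          have c3 : 72 ≤ x ∧ x < 108 := by omega
          have c4 : ¬(108 ≤ x) := by omega
          have hstep : pvAltStep (s, p, m, h) x =
            (s, p, m ++ PySem.Int.toChars (PySem.Int.floordiv (x - 72) 4 + 1), h) := by
            simp [pvAltStep, h1, h2, h3]
          rw [hstep, ih]
          simp [h1, h2, c3, c4, pvJoinDigits_cons, List.append_assoc]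
        · have c2 : ¬(36 ≤ x ∧ x < 72) := by omega
          have c3 : ¬(72 ≤ x ∧ x < 108) := by omega
          have c4 : 108 ≤ x := by omega
          have hstep : pvAltStep (s, p, m, h) x =
            (s, p, m, h ++ PySem.Int.toChars (PySem.Int.floordiv (x - 108) 4 + 1)) := by
            simp [pvAltStep, h1, h2, h3]
          rw [hstep, ih]
          simp [h1, h2, h3, c4, pvJoinDigits_cons, List.append_assoc]

theorem pv_seg (xs : List Int) (c : Char) :
    (if pvJoinDigits xs = [] then pvJoinDigits xs else pvJoinDigits xs ++ [c]) =
    (if xs = [] then ([] : List Char) else pvJoinDigits xs ++ [c]) := by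
  by_cases hx : xs = []
  · simp [hx, pvJoinDigits, PySem.Chars.join_nil]
  · simp [hx, (not_congr (pvJoinDigits_eq_nil_iff xs)).mpr hx]

-- ===== VERDICT (by name: the statement is the Claim_ definition above) =====
theorem to_one_line_string_spec : Claim_equal_to_one_line_string := by
  intro tiles _
  show to_one_line_string tiles = to_one_line_string_alt tiles
  unfold to_one_line_string to_one_line_string_alt
  simp only [pv_foldl_altStep, List.nil_append, pv_seg]
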